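-- pv_equiv track=rewrite | github.com/PezTorpedo/0xDEADBEEF | Attacks/ZigBee Side-channel Attack/Test/comparator.py | generate_mask
-- ===== SOURCE A (Python) =====
-- def generate_mask(samples):
--     if not samples:
--         return ""
--
--     # Check: all strings must have the same length
--     length = len(samples[0])
--     if any(len(s) != length for s in samples):
--         raise ValueError("All strings must have the same length")
--
--     mask = ""
--
--     for i in range(length):
--         # Take all characters at position i
--         chars = {s[i] for s in samples}
--
--         # If all equal → X, otherwise → 0
--         mask += "X" if len(chars) == 1 else "0"
--
--     return mask
-- ===== SOURCE B (Python) =====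
-- def generate_mask(samples):
--     if not samples:
--         return ""
--
--     length = len(samples[0])
--     if any(len(s) != length for s in samples):
--         raise ValueError("All strings must have the same length")
--
--     # Row-major: start all-'X', clear a column as soon as any sample differs from the first.
--     mask = ['X'] * length
--     ref = samples[0]
--     for s in samples[1:]:
--         for i in range(length):
--             if s[i] != ref[i]:
--                 mask[i] = '0'
--     return ''.join(mask)
-- ===== Notes on version B (the rewrite author's own statement) =====
-- stated objective: alternative
-- what changed: B builds the mask row-major: it starts from an all-uniform mask array and clears each position where a later sample differs from the first sample, instead of A's column-major pass that materializes a set of the characters of each column.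
import Mathlib
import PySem

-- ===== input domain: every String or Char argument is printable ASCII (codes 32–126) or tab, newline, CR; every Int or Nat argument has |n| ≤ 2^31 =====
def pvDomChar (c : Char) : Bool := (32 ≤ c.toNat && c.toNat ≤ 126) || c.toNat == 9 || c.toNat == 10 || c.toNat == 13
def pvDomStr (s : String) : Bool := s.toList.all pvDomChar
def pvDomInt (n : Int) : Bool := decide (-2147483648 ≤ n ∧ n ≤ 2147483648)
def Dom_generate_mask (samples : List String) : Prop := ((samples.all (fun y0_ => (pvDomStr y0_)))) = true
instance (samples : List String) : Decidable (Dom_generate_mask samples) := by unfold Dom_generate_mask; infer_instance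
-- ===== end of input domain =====

-- B builds the mask row-major (accumulating array cleared where a later sample differs from the first) instead of A's per-column set; alternative decomposition, same cost.

-- ===== PORT A =====
def generate_mask (samples : List String) : String :=
  if samples = [] then "" else
    let length := (samples.headD "").toList.length
    -- the ValueError on unequal lengths is excluded by Pre_generate_mask
    String.ofList ((List.range length).foldl (fun mask (i : Nat) =>
      let chars : PySem.Set Char :=
        PySem.Set.ofList (samples.map (fun s => (PySem.Str.pyGet? s (i : Int)).getD ' '))
      mask ++ [if chars.length = 1 then 'X' else '0']) [])

-- ===== PORT B =====
def generate_mask_alt (samples : List String) : String :=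
  match samples with
  | [] => ""
  | ref :: rest =>
    let length := ref.toList.length
    -- the ValueError on unequal lengths is excluded by Pre_generate_mask
    String.ofList (rest.foldl (fun mask s =>
      (List.range length).foldl (fun m (i : Nat) =>
        if (PySem.Str.pyGet? s (i : Int)).getD ' ' ≠ (PySem.Str.pyGet? ref (i : Int)).getD ' '
        then m.set i '0' else m) mask)
      (List.replicate length 'X'))

-- ===== PRECONDITION & SPEC =====
-- Pre_ excludes exactly the inputs where A (and B) raise ValueError: samples of unequal lengths.
def Pre_generate_mask (samples : List String) : Prop :=
  ∀ s ∈ samples, s.toList.length = (samples.headD "").toList.length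
instance (samples : List String) : Decidable (Pre_generate_mask samples) := by
  unfold Pre_generate_mask; infer_instance
def pvWitness_generate_mask : List String := ["abc", "axc"]

def Spec_generate_mask (samples : List String) (out : String) : Prop := out = generate_mask_alt samples
instance (samples : List String) (out : String) : Decidable (Spec_generate_mask samples out) := by unfold Spec_generate_mask; infer_instance

-- ===== CLAIM (what is proved, stated in full; the proofs are below) =====
def Claim_equal_generate_mask : Prop := ∀ (samples : List String), Dom_generate_mask samples → Pre_generate_mask samples → Spec_generate_mask samples (generate_mask samples)

-- ===== LEMMAS AND PROOFS =====

-- the character at position i that both ports read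
def pvCh (s : String) (i : Nat) : Char := (PySem.Str.pyGet? s (i : Int)).getD ' '

theorem pv_foldl_push {a b : Type} (f : a -> b) :
    forall (l : List a) (acc : List b), l.foldl (fun ac x => ac ++ [f x]) acc = acc ++ l.map f := by
  intro l
  induction l with
  | nil => simp
  | cons x xs ih => intro acc; simp [ih]

theorem pv_setlen_one {a : Type} [DecidableEq a] (x : a) (xs : List a) :
    (PySem.Set.ofList (x :: xs)).length = 1 ↔ ∀ y ∈ xs, y = x := by
  rw [PySem.Set.ofList_cons]
  have h1 : ((x :: (PySem.Set.ofList xs).discard x).length = 1) ↔ (PySem.Set.ofList xs).discard x = [] := by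
    simp
  rw [h1, List.eq_nil_iff_forall_not_mem]
  simp only [PySem.Set.mem_discard, PySem.Set.mem_ofList]
  constructor
  · intro h y hy
    by_contra hne
    exact h y ⟨hy, hne⟩
  · intro h y hc
    exact hc.2 (h y hc.1)

theorem pv_set_at {a : Type} : ∀ (l : List a) (y : a) (t : List a) (c : a),
    (l ++ y :: t).set l.length c = l ++ c :: t := by
  intro l
  induction l with
  | nil => simp
  | cons z zs ih => intro y t c; simp [ih]

theorem pv_set_at' {a : Type} (l : List a) (y : a) (t : List a) (c : a) (m : Nat)
    (hm : l.length = m) : (l ++ y :: t).set m c = l ++ c :: t := by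
  subst hm; exact pv_set_at l y t c

-- inner loop of B: one sample's pass over a mask of shape (range m).map g ++ tail
theorem pv_inner (s ref : String) :
    forall (m : Nat) (g : Nat -> Char) (tail : List Char),
      (List.range m).foldl (fun mm i =>
          if pvCh s i ≠ pvCh ref i then mm.set i '0' else mm)
        ((List.range m).map g ++ tail)
      = (List.range m).map (fun k => if pvCh s k ≠ pvCh ref k then '0' else g k) ++ tail := by
  intro m
  induction m with
  | zero => intro g tail; simp
  | succ m ih =>
    intro g tail
    rw [List.range_succ, List.map_append, List.map_append, List.foldl_append]
    simp only [List.map_cons, List.map_nil, List.foldl_cons, List.foldl_nil, List.append_assoc,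
      List.cons_append, List.nil_append]
    rw [ih g (g m :: tail)]
    by_cases h : pvCh s m ≠ pvCh ref m
    · have hlen : ((List.range m).map fun k => if pvCh s k ≠ pvCh ref k then '0' else g k).length = m := by
        simp
      rw [if_pos h, if_pos h, pv_set_at' _ _ _ _ _ hlen]
    · rw [if_neg h, if_neg h]

-- outer loop of B
theorem pv_outer (ref : String) (n : Nat) :
    forall (rest : List String) (g : Nat -> Char),
      rest.foldl (fun mask s =>
          (List.range n).foldl (fun m i =>
            if pvCh s i ≠ pvCh ref i then m.set i '0' else m) mask)
        ((List.range n).map g)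
      = (List.range n).map (fun k => if (∃ s ∈ rest, pvCh s k ≠ pvCh ref k) then '0' else g k) := by
  intro rest
  induction rest with
  | nil => intro g; simp
  | cons s rest ih =>
    intro g
    rw [List.foldl_cons]
    have hstep := pv_inner s ref n g []
    rw [List.append_nil, List.append_nil] at hstep
    rw [hstep, ih]
    apply List.map_congr_left
    intro k _
    by_cases hs : pvCh s k ≠ pvCh ref k <;>
      by_cases hr : ∃ t ∈ rest, pvCh t k ≠ pvCh ref k <;>
      simp [hs, hr]

-- ===== VERDICT (by name: the statement is the Claim_ definition above) =====
theorem generate_mask_spec : Claim_equal_generate_mask := by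
  intro samples _ _
  unfold Spec_generate_mask
  cases samples with
  | nil => rfl
  | cons ref rest =>
    show generate_mask (ref :: rest) = generate_mask_alt (ref :: rest)
    unfold generate_mask generate_mask_alt
    rw [if_neg (by simp)]
    simp only [List.headD_cons]
    change String.ofList ((List.range ref.toList.length).foldl (fun mask i =>
        mask ++ [if (PySem.Set.ofList ((ref :: rest).map (fun s => pvCh s i))).length = 1
                 then 'X' else '0']) [])
      = String.ofList (rest.foldl (fun mask s =>
          (List.range ref.toList.length).foldl (fun m i =>
            if pvCh s i ≠ pvCh ref i then m.set i '0' else m) mask)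
          (List.replicate ref.toList.length 'X'))
    have hrep : List.replicate ref.toList.length 'X'
        = (List.range ref.toList.length).map (fun _ => 'X') := by simp
    rw [hrep, pv_outer ref ref.toList.length rest (fun _ => 'X'),
        pv_foldl_push _ (List.range ref.toList.length) []]
    rw [List.nil_append]
    congr 1
    apply List.map_congr_left
    intro k _
    rw [List.map_cons]
    simp only [pv_setlen_one]
    by_cases h : ∃ s ∈ rest, pvCh s k ≠ pvCh ref k
    · rw [if_neg, if_pos h]
      intro hall
      obtain ⟨s, hsmem, hne⟩ := h
      exact hne (hall (pvCh s k) (List.mem_map.mpr ⟨s, hsmem, rfl⟩))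
    · rw [if_pos, if_neg h]
      intro y hy
      obtain ⟨s, hsmem, rfl⟩ := List.mem_map.mp hy
      push Not at h
      exact h s hsmem
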